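-- pv_equiv track=rewrite | github.com/home-assistant/core | homeassistant/util/percentage.py | percentage_to_ordered_list_item
-- ===== SOURCE A (Python) =====
-- def percentage_to_ordered_list_item(ordered_list: list[str], percentage: int) -> str:
--     """Find the item that most closely matches the percentage in an ordered list.
--
--     When using this utility for fan speeds, do not include "off"
--
--     Given the list: ["low", "medium", "high", "very_high"], this
--     function will return the following when when the item is passed
--     in:
--
--         1-25: low
--         26-50: medium
--         51-75: high
--         76-100: very_high
--     """
--     list_len = len(ordered_list)
--     if not list_len:
--         raise ValueError("The ordered list is empty")
--
--     for offset, speed in enumerate(ordered_list):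
--         list_position = offset + 1
--         upper_bound = (list_position * 100) // list_len
--         if percentage <= upper_bound:
--             return speed
--
--     return ordered_list[-1]
-- ===== SOURCE B (Python) =====
-- def percentage_to_ordered_list_item(ordered_list: list[str], percentage: int) -> str:
--     """Closed-form: index = ceil(percentage * len / 100), clamped to [1, len]."""
--     n = len(ordered_list)
--     if not n:
--         raise ValueError("The ordered list is empty")
--     k = max(1, min(n, -((-percentage * n) // 100)))
--     return ordered_list[k - 1]
-- ===== Notes on version B (the rewrite author's own statement) =====
-- stated objective: faster
-- what changed: Replaces the linear scan over enumerate(ordered_list) by a closed-form index ceil(percentage*len/100) clamped to [1,len], then a single list access.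
import Mathlib
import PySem

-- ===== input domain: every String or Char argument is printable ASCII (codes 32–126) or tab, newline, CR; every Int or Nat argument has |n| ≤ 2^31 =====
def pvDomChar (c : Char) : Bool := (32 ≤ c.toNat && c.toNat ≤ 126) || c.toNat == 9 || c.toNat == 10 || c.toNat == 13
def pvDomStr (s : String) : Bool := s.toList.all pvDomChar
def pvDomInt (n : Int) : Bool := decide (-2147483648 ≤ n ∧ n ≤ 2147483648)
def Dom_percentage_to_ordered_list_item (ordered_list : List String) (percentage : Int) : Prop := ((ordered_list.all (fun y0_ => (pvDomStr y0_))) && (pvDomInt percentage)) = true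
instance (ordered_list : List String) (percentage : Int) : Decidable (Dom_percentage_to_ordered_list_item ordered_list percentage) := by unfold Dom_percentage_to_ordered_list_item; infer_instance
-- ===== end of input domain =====

-- Header: B replaces A's linear scan with a closed-form clamped ceiling index (O(1) vs O(n)).
-- ===== PORT A =====
-- A's for-loop over enumerate(ordered_list): structural recursion over the enumerated pairs.
def pvLoopA (percentage list_len : Int) : List (Int × String) → Option String
  | [] => none
  | (offset, speed) :: rest =>
    if percentage ≤ PySem.Int.floordiv ((offset + 1) * 100) list_len then some speed
    else pvLoopA percentage list_len rest

def percentage_to_ordered_list_item (ordered_list : List String) (percentage : Int) : String :=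
  let list_len : Int := ordered_list.length
  -- A raises ValueError on the empty list; Pre_ excludes it, the port returns "" there.
  match pvLoopA percentage list_len (PySem.List.enumerate ordered_list 0) with
  | some speed => speed
  | none => (PySem.List.pyGet? ordered_list (-1)).getD ""

-- ===== PORT B =====
def percentage_to_ordered_list_item_alt (ordered_list : List String) (percentage : Int) : String :=
  let n : Int := ordered_list.length
  -- B raises ValueError on the empty list; Pre_ excludes it, the port returns "" there.
  if n = 0 then ""
  else
    let k : Int := max 1 (min n (-(PySem.Int.floordiv (-percentage * n) 100)))
    (PySem.List.pyGet? ordered_list (k - 1)).getD ""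

-- ===== PRECONDITION & SPEC =====
-- Both A and B raise ValueError exactly on the empty list; Pre_ excludes it.
def Pre_percentage_to_ordered_list_item (ordered_list : List String) (percentage : Int) : Prop :=
  ordered_list ≠ []
instance (ordered_list : List String) (percentage : Int) : Decidable (Pre_percentage_to_ordered_list_item ordered_list percentage) := by unfold Pre_percentage_to_ordered_list_item; infer_instance
def pvWitness_percentage_to_ordered_list_item : List String × Int := (["low", "medium", "high"], 40)
def Spec_percentage_to_ordered_list_item (ordered_list : List String) (percentage : Int) (out : String) : Prop := out = percentage_to_ordered_list_item_alt ordered_list percentage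
instance (ordered_list : List String) (percentage : Int) (out : String) : Decidable (Spec_percentage_to_ordered_list_item ordered_list percentage out) := by unfold Spec_percentage_to_ordered_list_item; infer_instance

-- ===== CLAIM (what is proved, stated in full; the proofs are below) =====
def Claim_equal_percentage_to_ordered_list_item : Prop := ∀ (ordered_list : List String) (percentage : Int), Dom_percentage_to_ordered_list_item ordered_list percentage → Pre_percentage_to_ordered_list_item ordered_list percentage → Spec_percentage_to_ordered_list_item ordered_list percentage (percentage_to_ordered_list_item ordered_list percentage)

-- ===== LEMMAS AND PROOFS =====

-- Characterisation of A's loop: with k0 the ceiling index (k0 ≤ j+1 ↔ offset j passes the test),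
-- the scan over enumerate l i returns the element at offset max i (k0-1) when one exists.
theorem pvLoopA_char (p n k0 : Int)
    (hcond : ∀ j : Int, (p ≤ PySem.Int.floordiv ((j + 1) * 100) n) ↔ k0 ≤ j + 1) :
    ∀ (l : List String) (i : Int),
      pvLoopA p n (PySem.List.enumerate l i) =
        if k0 ≤ i + l.length then l[(max 0 (k0 - 1 - i)).toNat]? else none := by
  intro l
  induction l with
  | nil => intro i; simp [PySem.List.enumerate_nil, pvLoopA]
  | cons x xs ih =>
    intro i
    rw [PySem.List.enumerate_cons]
    simp only [pvLoopA, hcond i]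
    by_cases h1 : k0 ≤ i + 1
    · have : k0 ≤ i + (x :: xs).length := by simp; omega
      rw [if_pos h1, if_pos this]
      have : (max 0 (k0 - 1 - i)).toNat = 0 := by omega
      simp [this]
    · rw [if_neg h1, ih (i + 1)]
      have hlen : (i + 1 + (xs.length : Int) = i + ((x :: xs).length : Int)) := by simp; omega
      by_cases h2 : k0 ≤ i + 1 + xs.length
      · rw [if_pos h2, if_pos (by omega)]
        have ht : (max 0 (k0 - 1 - i)).toNat = (max 0 (k0 - 1 - (i + 1))).toNat + 1 := by omega
        simp [ht]
      · rw [if_neg h2, if_neg (by simp; omega)]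

theorem percentage_to_ordered_list_item_spec : Claim_equal_percentage_to_ordered_list_item := by
  unfold Claim_equal_percentage_to_ordered_list_item
  intro l p _hdom hpre
  unfold Spec_percentage_to_ordered_list_item
  unfold Pre_percentage_to_ordered_list_item at hpre
  have hn : 0 < (l.length : Int) := by
    have := List.length_pos_iff.mpr hpre; omega
  set k0 : Int := -(PySem.Int.floordiv (-p * ↑l.length) 100) with hk0_def
  have hk0 : (k0 - 1) * 100 < p * ↑l.length ∧ p * ↑l.length ≤ k0 * 100 := by
    have e : -(p * (l.length : Int)) = -p * ↑l.length := by ring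
    have := (PySem.Int.neg_floordiv_neg_eq_iff_of_pos (a := p * ↑l.length) (b := 100) (q := k0)
      (by norm_num)).mp (by rw [hk0_def, e])
    omega
  have hcond : ∀ j : Int, (p ≤ PySem.Int.floordiv ((j + 1) * 100) ↑l.length) ↔ k0 ≤ j + 1 := by
    intro j
    rw [PySem.Int.le_floordiv_iff_mul_le hn]
    constructor
    · intro h; nlinarith [hk0.1, hk0.2]
    · intro h; nlinarith [hk0.1, hk0.2]
  simp only [percentage_to_ordered_list_item, percentage_to_ordered_list_item_alt]
  rw [pvLoopA_char p ↑l.length k0 hcond l 0]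
  rw [if_neg (by omega : ¬ (l.length : Int) = 0), ← hk0_def]
  simp only [sub_zero, zero_add]
  by_cases hk : k0 ≤ (l.length : Int)
  · rw [if_pos hk]
    have hidx : max 1 (min (↑l.length : Int) k0) - 1 = ((max 0 (k0 - 1)).toNat : Int) := by
      omega
    rw [hidx, PySem.List.pyGet?_natCast]
    have hlt : (max 0 (k0 - 1)).toNat < l.length := by omega
    rw [List.getElem?_eq_getElem hlt]
    rfl
  · rw [if_neg hk]
    have hidx : max 1 (min (↑l.length : Int) k0) - 1 = (((l.length - 1 : Nat)) : Int) := by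
      omega
    rw [hidx, PySem.List.pyGet?_natCast]
    simp [PySem.List.pyGet?_neg_one, List.getLast?_eq_getElem?]
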